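-- pv_equiv track=rewrite | github.com/DEVgrown/Finance-Growth-Co-pilot | backend/finance/services/ai_services.py | _identify_risk_factors
-- ===== SOURCE A (Python) =====
-- from typing import Dict, List, Any, Tuple
--
-- def _identify_risk_factors(insights: List[str]) -> List[str]:
--     """Identify potential risk factors"""
--     risks = []
--
--     for insight in insights:
--         if "Negative cash flow" in insight:
--             risks.append("Cash flow risk - potential liquidity issues")
--         elif "overdue invoices" in insight:
--             risks.append("Credit risk - customers may default on payments")
--         elif "High budget utilization" in insight:
--             risks.append("Budget risk - potential overspending")
--
--     return risks
-- ===== SOURCE B (Python) =====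
-- from typing import Dict, List, Any, Tuple
--
-- _KEYWORDS = ["Negative cash flow", "overdue invoices", "High budget utilization"]
-- _MESSAGES = ["Cash flow risk - potential liquidity issues",
--              "Credit risk - customers may default on payments",
--              "Budget risk - potential overspending"]
--
-- def _identify_risk_factors(insights: List[str]) -> List[str]:
--     """Identify potential risk factors.
--
--     Inverted (keyword-major) traversal: for each keyword, in priority order,
--     mark every not-yet-classified insight that contains it; then emit the
--     messages in insight order.  Correct because priority order of the outer
--     loop means the first keyword to claim an insight is its highest-priority
--     match, and emitting by ascending insight index restores A's output order.
--     """
--     best = {}  # insight index -> index of its highest-priority matching keyword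
--     for cat, keyword in enumerate(_KEYWORDS):
--         for idx, insight in enumerate(insights):
--             if idx not in best and keyword in insight:
--                 best[idx] = cat
--     return [_MESSAGES[best[i]] for i in range(len(insights)) if i in best]
-- ===== Notes on version B (the rewrite author's own statement) =====
-- stated objective: alternative
-- what changed: Inverts the traversal: instead of A's per-insight if/elif chain in one pass over insights, B loops keyword-major (outer loop over the three keywords in priority order, inner loop over insights) filling a dict from insight index to the first keyword that claims it, then emits messages by ascending insight index; first-claim under priority order reproduces A's elif priority and the final index sweep restores A's output order.
import Mathlib
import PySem

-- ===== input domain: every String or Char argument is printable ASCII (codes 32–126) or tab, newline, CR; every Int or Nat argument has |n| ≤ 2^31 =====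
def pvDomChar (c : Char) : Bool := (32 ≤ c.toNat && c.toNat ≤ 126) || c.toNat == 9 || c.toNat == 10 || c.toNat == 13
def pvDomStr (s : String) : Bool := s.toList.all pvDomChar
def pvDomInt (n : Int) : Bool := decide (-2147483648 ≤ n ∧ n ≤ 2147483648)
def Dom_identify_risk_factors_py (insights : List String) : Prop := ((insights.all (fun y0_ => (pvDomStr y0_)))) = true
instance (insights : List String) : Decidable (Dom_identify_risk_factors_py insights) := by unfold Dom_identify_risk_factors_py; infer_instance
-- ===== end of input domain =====

-- B inverts A's traversal: keyword-major loops filling an index->keyword dict, then a sweep by insight index; same cost, different algorithm structure.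


-- ===== PORT A =====
def identify_risk_factors_py (insights : List String) : List String :=
  insights.foldl (fun risks insight =>
    if PySem.Str.isIn "Negative cash flow" insight then
      risks ++ ["Cash flow risk - potential liquidity issues"]
    else if PySem.Str.isIn "overdue invoices" insight then
      risks ++ ["Credit risk - customers may default on payments"]
    else if PySem.Str.isIn "High budget utilization" insight then
      risks ++ ["Budget risk - potential overspending"]
    else risks) []

-- ===== PORT B =====
def riskKeywords : List String :=
  ["Negative cash flow", "overdue invoices", "High budget utilization"]
def riskMessages : List String :=
  ["Cash flow risk - potential liquidity issues",
   "Credit risk - customers may default on payments",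
   "Budget risk - potential overspending"]

def identify_risk_factors_py_alt (insights : List String) : List String :=
  let best : PySem.Dict Int Int :=
    (PySem.List.enumerate riskKeywords).foldl (fun best ck =>
      (PySem.List.enumerate insights).foldl (fun best p =>
        if !best.contains p.1 && PySem.Str.isIn ck.2 p.2 then best.insert p.1 ck.1
        else best) best) PySem.Dict.empty
  -- [_MESSAGES[best[i]] for i in range(len(insights)) if i in best]
  (PySem.List.pyRange 0 (insights.length : Int) 1).filterMap (fun i =>
    (best.get? i).map (fun c => PySem.List.pyGetD riskMessages c ""))

-- ===== PRECONDITION & SPEC =====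
def Spec_identify_risk_factors_py (insights : List String) (out : List String) : Prop := out = identify_risk_factors_py_alt insights
instance (insights : List String) (out : List String) : Decidable (Spec_identify_risk_factors_py insights out) := by unfold Spec_identify_risk_factors_py; infer_instance

-- ===== CLAIM (what is proved, stated in full; the proofs are below) =====
def Claim_equal_identify_risk_factors_py : Prop := ∀ (insights : List String), Dom_identify_risk_factors_py insights → Spec_identify_risk_factors_py insights (identify_risk_factors_py insights)

-- ===== LEMMAS AND PROOFS =====

-- first-match message of a single insight: the common characterisation of both sides
def msgOf (s : String) : Option String :=
  if PySem.Str.isIn "Negative cash flow" s then some "Cash flow risk - potential liquidity issues"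
  else if PySem.Str.isIn "overdue invoices" s then some "Credit risk - customers may default on payments"
  else if PySem.Str.isIn "High budget utilization" s then some "Budget risk - potential overspending"
  else none

-- A-side: the foldl accumulates exactly the filterMap of msgOf
lemma a_foldl_eq (insights : List String) (acc : List String) :
    insights.foldl (fun risks insight =>
      if PySem.Str.isIn "Negative cash flow" insight then
        risks ++ ["Cash flow risk - potential liquidity issues"]
      else if PySem.Str.isIn "overdue invoices" insight then
        risks ++ ["Credit risk - customers may default on payments"]
      else if PySem.Str.isIn "High budget utilization" insight then
        risks ++ ["Budget risk - potential overspending"]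
      else risks) acc
    = acc ++ insights.filterMap msgOf := by
  induction insights generalizing acc with
  | nil => simp
  | cons i rest ih =>
    rw [List.foldl_cons, List.filterMap_cons]
    have hstep : (if PySem.Str.isIn "Negative cash flow" i then
        acc ++ ["Cash flow risk - potential liquidity issues"]
      else if PySem.Str.isIn "overdue invoices" i then
        acc ++ ["Credit risk - customers may default on payments"]
      else if PySem.Str.isIn "High budget utilization" i then
        acc ++ ["Budget risk - potential overspending"]
      else acc) = acc ++ (msgOf i).toList := by
      unfold msgOf; split_ifs <;> simp
    rw [hstep, ih]
    cases msgOf i <;> simp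

-- B-side inner loop: its effect on a single lookup
lemma inner_get? (key : String) (cat : Int) :
    ∀ (l : List String) (s : Int) (best : PySem.Dict Int Int) (i : Int),
    ((PySem.List.enumerate l s).foldl (fun best p =>
        if !best.contains p.1 && PySem.Str.isIn key p.2 then best.insert p.1 cat
        else best) best).get? i
    = if best.contains i then best.get? i
      else if (PySem.List.enumerate l s).any (fun p => p.1 == i && PySem.Str.isIn key p.2)
        then some cat else none := by
  intro l
  induction l with
  | nil =>
    intro s best i
    simp only [PySem.List.enumerate_nil, List.foldl_nil, List.any_nil, Bool.false_eq_true,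
      if_false]
    split_ifs with h
    · rfl
    · exact (PySem.Dict.get?_eq_none_iff_contains best i).2 (by simpa using h)
  | cons x rest ih =>
    intro s best i
    rw [PySem.List.enumerate_cons, List.foldl_cons, List.any_cons, ih]
    by_cases hd : (!best.contains (s, x).1 && PySem.Str.isIn key (s, x).2) = true
    · rw [if_pos hd]
      simp only [Bool.and_eq_true, Bool.not_eq_true'] at hd
      obtain ⟨hcs, hkx⟩ := hd
      by_cases his : i = s
      · subst his
        rw [if_pos (PySem.Dict.contains_insert_self best i cat),
          PySem.Dict.get?_insert_self, if_neg (by simp [hcs]), if_pos]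
        rw [Bool.or_eq_true, Bool.and_eq_true]
        exact Or.inl ⟨by simp, hkx⟩
      · rw [PySem.Dict.contains_insert, PySem.Dict.get?_insert]
        have hbe : (i == s) = false := by simpa using his
        have hbe' : ((s, x).1 == i) = false := by simpa using fun h => his h.symm
        simp only [hbe, hbe', Bool.false_or, Bool.false_and, if_neg his]
    · rw [if_neg hd]
      by_cases hci : best.contains i = true
      · simp [hci]
      · have hci' : best.contains i = false := by simpa using hci
        by_cases his : i = s
        · subst his
          have hd2 := Bool.eq_false_iff.2 hd
          rw [hci'] at hd2
          simp only [Bool.not_false, Bool.true_and, PySem.Str.isIn] at hd2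
          simp only [hci', Bool.false_eq_true, if_false, PySem.Str.isIn, hd2,
            beq_self_eq_true, Bool.true_and, Bool.false_or]
          rfl
        · have hbe2 : (s == i) = false := by simpa using fun h => his h.symm
          simp only [hci', Bool.false_eq_true, if_false, hbe2, Bool.false_and, Bool.false_or]

-- the per-index hit test equals testing the indexed element
lemma any_enumerate_at (f : String → Bool) (l : List String) (k : Nat) (hk : k < l.length) :
    ((PySem.List.enumerate l 0).any (fun p => p.1 == (k : Int) && f p.2)) = f (l[k]'hk) := by
  by_cases hf : f (l[k]'hk) = true
  · rw [hf, List.any_eq_true]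
    exact ⟨((k : Int), l[k]'hk), (PySem.List.mem_enumerate_iff l 0 _).2 ⟨k, hk, by simp⟩,
      by simp [hf]⟩
  · have hf' : f (l[k]'hk) = false := by simpa using hf
    rw [hf', List.any_eq_false]
    intro p hp
    rcases (PySem.List.mem_enumerate_iff l 0 p).1 hp with ⟨j, hj, rfl⟩
    simp only [Bool.and_eq_true, beq_iff_eq, not_and]
    intro hji
    have : j = k := by omega
    subst this
    simp [hf']

-- category index of a message (the dict stores positions into riskKeywords)
def catOf (m : String) : Int :=
  if m = "Cash flow risk - potential liquidity issues" then 0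
  else if m = "Credit risk - customers may default on payments" then 1 else 2

-- B-side: the fully built dict answers msgOf (as a category index) at every valid index
lemma best_get? (insights : List String) (k : Nat) (hk : k < insights.length) :
    ((PySem.List.enumerate riskKeywords).foldl (fun best ck =>
      (PySem.List.enumerate insights).foldl (fun best p =>
        if !best.contains p.1 && PySem.Str.isIn ck.2 p.2 then best.insert p.1 ck.1
        else best) best) PySem.Dict.empty).get? (k : Int)
    = (msgOf (insights[k]'hk)).map catOf := by
  have h0 := any_enumerate_at (PySem.Str.isIn "Negative cash flow") insights k hk
  have h1 := any_enumerate_at (PySem.Str.isIn "overdue invoices") insights k hk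
  have h2 := any_enumerate_at (PySem.Str.isIn "High budget utilization") insights k hk
  rw [show PySem.List.enumerate riskKeywords =
    [((0 : Int), "Negative cash flow"), (1, "overdue invoices"), (2, "High budget utilization")]
    from rfl]
  simp only [List.foldl_cons, List.foldl_nil]
  rw [inner_get?, PySem.Dict.contains_eq_isSome_get?, inner_get?,
    PySem.Dict.contains_eq_isSome_get?, inner_get?, PySem.Dict.contains_empty,
    PySem.Dict.get?_empty]
  simp only [Bool.false_eq_true, if_false, h0, h1, h2]
  unfold msgOf catOf
  split_ifs with c0 c1 c2 <;> simp_all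

-- indexing riskMessages at the stored category recovers the message
lemma msg_roundtrip (s : String) :
    (msgOf s).map ((fun c => PySem.List.pyGetD riskMessages c "") ∘ catOf) = msgOf s := by
  unfold msgOf
  split_ifs <;> rfl

-- filterMap over the enumeration of l, looking only at the element, is filterMap over l
lemma filterMap_enumerate_snd (f : String → Option String) :
    ∀ (l : List String) (s : Int),
    (PySem.List.enumerate l s).filterMap (fun p => f p.2) = l.filterMap f := by
  intro l
  induction l with
  | nil => intro s; simp [PySem.List.enumerate_nil]
  | cons x rest ih =>
    intro s
    rw [PySem.List.enumerate_cons, List.filterMap_cons, List.filterMap_cons, ih]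

-- B-side: the whole alternative implementation is the filterMap of msgOf
lemma b_alt_eq (insights : List String) :
    identify_risk_factors_py_alt insights = insights.filterMap msgOf := by
  rw [show identify_risk_factors_py_alt insights
      = (PySem.List.pyRange 0 (insights.length : Int) 1).filterMap (fun i =>
          (((PySem.List.enumerate riskKeywords).foldl (fun best ck =>
            (PySem.List.enumerate insights).foldl (fun best p =>
              if !best.contains p.1 && PySem.Str.isIn ck.2 p.2 then best.insert p.1 ck.1
              else best) best) PySem.Dict.empty).get? i).map
            (fun c => PySem.List.pyGetD riskMessages c "")) from rfl]
  rw [show PySem.List.pyRange 0 (insights.length : Int) 1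
      = (PySem.List.enumerate insights 0).map (fun p : Int × String => p.1) by
    rw [PySem.List.map_fst_enumerate]; norm_num]
  rw [List.filterMap_map]
  rw [List.filterMap_congr (g := fun p : Int × String => msgOf p.2) ?_,
    filterMap_enumerate_snd]
  intro p hp
  rcases (PySem.List.mem_enumerate_iff insights 0 p).1 hp with ⟨j, hj, rfl⟩
  simp only [Function.comp_apply]
  have hb := best_get? insights j hj
  simp only [Int.zero_add] at hb ⊢
  rw [hb, Option.map_map]
  exact msg_roundtrip _

-- ===== VERDICT (by name: the statement is the Claim_ definition above) =====
theorem identify_risk_factors_py_spec : Claim_equal_identify_risk_factors_py := by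
  intro insights _
  unfold Spec_identify_risk_factors_py identify_risk_factors_py
  rw [a_foldl_eq insights [], b_alt_eq]
  simp
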